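-- pv_equiv track=rewrite | github.com/qxmsxc/PHAS0077_Enhancing-the-Quantemol-Database-QDB | MakeDatabase.py | Addones
-- ===== SOURCE A (Python) =====
-- def Addones(formula):
--     l = list(formula)
--     if l[-1] == '+' or l[-1] == '-': # If ion, the second last position must be digit. If not, add '1'
--         if not l[-2].isdigit():
--             l[-2] = l[-2] + '1'
--
--     else:# If not ion, the last position must be digit. If not, add '1'
--         if l[-1].isalpha():
--             l[-1] = l[-1] + '1'
--
--     for i in range(1,len(formula)): # add '1's after the elements which are not followed by digits
--         if l[i].isupper() and not l[i-1].isdigit():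
--             l[i-1] = l[i-1] + '1'
--
--     return ''.join(l)
-- ===== SOURCE B (Python) =====
-- def Addones(formula):
--     # Tokenize the formula into chunks, each chunk starting at an uppercase
--     # letter (or at position 0); map the '1'-rule over the chunks; join.
--     chunks = []
--     cur = formula[0]            # IndexError on '' (like A)
--     for c in formula[1:]:
--         if c.isupper():
--             chunks.append(cur)
--             cur = c
--         else:
--             cur += c
--     chunks.append(cur)
--     # every non-final chunk is followed by an uppercase letter:
--     # append '1' exactly when the chunk ends in a non-digit
--     body = [ch + '1' if not ch[-1].isdigit() else ch for ch in chunks[:-1]]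
--     last = chunks[-1]
--     if last[-1] in '+-':        # ion: fix the stem before the sign
--         stem = last[:-1]
--         if not stem[-1].isdigit():   # IndexError on '+'/'-' alone (like A)
--             stem += '1'
--         last = stem + last[-1]
--     elif last[-1].isalpha():
--         last += '1'
--     return ''.join(body) + last
-- ===== Notes on version B (the rewrite author's own statement) =====
-- stated objective: alternative
-- what changed: Replaces A's index-driven in-place mutation of a char list (tail-fix block plus a second pass rewriting cells) with a tokenizer: the formula is split into chunks starting at each uppercase letter, the '1'-rule is mapped over the non-final chunks (append '1' iff the chunk ends in a non-digit) with the ion/alpha tail rule applied to the final chunk, and the chunks are joined.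
-- outside the precondition, e.g. on Addones(''): A raises IndexError, B raises IndexError; on Addones('+'): A raises IndexError, B raises IndexError; on Addones('-'): A raises IndexError, B raises IndexError
import Mathlib
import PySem

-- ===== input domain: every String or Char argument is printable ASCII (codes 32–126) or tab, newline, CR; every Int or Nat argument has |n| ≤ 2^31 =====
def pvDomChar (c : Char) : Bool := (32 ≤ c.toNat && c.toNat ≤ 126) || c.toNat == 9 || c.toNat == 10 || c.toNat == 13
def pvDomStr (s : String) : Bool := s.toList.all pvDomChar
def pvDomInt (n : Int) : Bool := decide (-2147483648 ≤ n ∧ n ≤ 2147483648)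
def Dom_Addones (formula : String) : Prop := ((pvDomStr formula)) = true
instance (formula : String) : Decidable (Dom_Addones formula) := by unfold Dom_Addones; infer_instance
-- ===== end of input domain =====

-- B replaces A's index-driven in-place mutation of a char list by a tokenizer: split the formula
-- into chunks starting at each uppercase letter, map the '1'-rule over the chunks, join (objective: alternative).

-- ===== PORT A =====
-- A-side helper: Python str.isupper(), hand-ported (exact on the ASCII domain: at least one
-- letter and no lowercase letter; cased characters in that range are exactly the letters)
def pyStrIsupper (cs : List Char) : Bool :=
  cs.any PySem.Chars.isalpha && cs.all (fun c => !PySem.Chars.islower c)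

-- A-side helper: the body of A's for-loop (if l[i].isupper() and not l[i-1].isdigit(): l[i-1] += '1')
def stepA (l : List (List Char)) (i : Int) : List (List Char) :=
  if pyStrIsupper (PySem.List.pyGetD l i []) && !PySem.Chars.strIsdigit (PySem.List.pyGetD l (i-1) []) then
    PySem.List.pySetD l (i-1) (PySem.List.pyGetD l (i-1) [] ++ ['1'])
  else l

def Addones (formula : String) : String :=
  let l0 : List (List Char) := formula.toList.map (fun c => [c])    -- l = list(formula)
  let l1 :=
    if PySem.List.pyGetD l0 (-1) [] = ['+'] ∨ PySem.List.pyGetD l0 (-1) [] = ['-'] then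
      if !PySem.Chars.strIsdigit (PySem.List.pyGetD l0 (-2) []) then
        PySem.List.pySetD l0 (-2) (PySem.List.pyGetD l0 (-2) [] ++ ['1'])
      else l0
    else
      if PySem.Chars.strIsalpha (PySem.List.pyGetD l0 (-1) []) then
        PySem.List.pySetD l0 (-1) (PySem.List.pyGetD l0 (-1) [] ++ ['1'])
      else l0
  let l2 := (PySem.List.pyRange 1 (formula.toList.length : Int) 1).foldl stepA l1
  String.ofList l2.flatten    -- ''.join(l): concatenation of the pieces

-- ===== PORT B =====
-- B-side helper: the tokenizer loop body (if c.isupper(): chunks.append(cur); cur = c else: cur += c)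
def chunkStep (st : List (List Char) × List Char) (c : Char) : List (List Char) × List Char :=
  if PySem.Chars.isupper c then (st.1 ++ [st.2], [c]) else (st.1, st.2 ++ [c])

-- B-side helper: the comprehension body (ch + '1' if not ch[-1].isdigit() else ch)
def fChunk (ch : List Char) : List Char :=
  if !PySem.Chars.isdigit (PySem.List.pyGetD ch (-1) ' ') then ch ++ ['1'] else ch

-- B-side helper: the final-chunk handling (ion stem fix / trailing-alpha rule)
def gLast (ch : List Char) : List Char :=
  if PySem.List.pyGetD ch (-1) ' ' = '+' ∨ PySem.List.pyGetD ch (-1) ' ' = '-' then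
    (if !PySem.Chars.isdigit (PySem.List.pyGetD ch.dropLast (-1) ' ') then ch.dropLast ++ ['1']
     else ch.dropLast) ++ [PySem.List.pyGetD ch (-1) ' ']
  else if PySem.Chars.isalpha (PySem.List.pyGetD ch (-1) ' ') then ch ++ ['1'] else ch

def Addones_alt (formula : String) : String :=
  let cs := formula.toList
  let cur0 : List Char := [PySem.List.pyGetD cs 0 ' ']     -- cur = formula[0] (IndexError on '', excluded by Pre_)
  let st := (cs.drop 1).foldl chunkStep ([], cur0)          -- for c in formula[1:]: …
  let chunks := st.1 ++ [st.2]                              -- chunks.append(cur)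
  String.ofList (((chunks.dropLast.map fChunk).flatten) ++ gLast (chunks.getLast?.getD []))

-- ===== PRECONDITION & SPEC =====
-- Pre_ excludes exactly the inputs on which A raises IndexError: the empty string (l[-1])
-- and the one-character strings ending in '+'/'-' (l[-2]).
def Pre_Addones (formula : String) : Prop :=
  formula.toList ≠ [] ∧
    ((formula.toList.getLast? = some '+' ∨ formula.toList.getLast? = some '-') → 2 ≤ formula.toList.length)
instance (formula : String) : Decidable (Pre_Addones formula) := by unfold Pre_Addones; infer_instance
def pvWitness_Addones : String := "NaH+"

def Spec_Addones (formula : String) (out : String) : Prop := out = Addones_alt formula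
instance (formula : String) (out : String) : Decidable (Spec_Addones formula out) := by unfold Spec_Addones; infer_instance

-- ===== CLAIM (what is proved, stated in full; the proofs are below) =====
def Claim_equal_Addones : Prop := ∀ (formula : String), Dom_Addones formula → Pre_Addones formula → Spec_Addones formula (Addones formula)

-- ===== LEMMAS AND PROOFS =====

-- ===== proof-side definitions =====
-- the two '1'-marks at position j: lookahead mark (next char uppercase, this one no digit)
def lmarkB (cs : List Char) (j : Nat) : Bool :=
  decide (j + 1 < cs.length) && PySem.Chars.isupper (cs.getD (j+1) ' ') && !PySem.Chars.isdigit (cs.getD j ' ')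

-- tail mark (ion: second-last non-digit; else: last alphabetic)
def tmGen (cs : List Char) (ion : Bool) (j : Nat) : Bool :=
  (ion && decide (j + 2 = cs.length) && !PySem.Chars.isdigit (cs.getD j ' '))
  || (!ion && decide (j + 1 = cs.length) && PySem.Chars.isalpha (cs.getD j ' '))

def sigChar (c : Char) : Bool := c == '+' || c == '-'
def ionOf (cs : List Char) : Bool := sigChar (PySem.List.pyGetD cs (-1) ' ')

-- common normal form, positional: every char followed by its mark
def NForm (cs : List Char) (ion : Bool) : List Char :=
  (cs.mapIdx (fun j c => c :: (if (tmGen cs ion j || lmarkB cs j) then ['1'] else []))).flatten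

-- common normal form, recursive
def insOnes (ion : Bool) : List Char → List Char
  | [] => []
  | c :: t =>
      (c :: (if (tmGen (c :: t) ion 0 || lmarkB (c :: t) 0) then ['1'] else [])) ++ insOnes ion t

-- A-side invariant machinery
def CB (l1 : List (List Char)) (j : Nat) : Bool :=
  pyStrIsupper (l1.getD (j+1) []) && !PySem.Chars.strIsdigit (l1.getD j [])

def SState (l1 : List (List Char)) (k : Nat) : List (List Char) :=
  l1.mapIdx (fun j s => if j + 2 ≤ k ∧ CB l1 j = true then s ++ ['1'] else s)

theorem upper_not_lower (c : Char) (h : PySem.Chars.isupper c = true) : PySem.Chars.islower c = false := by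
  simp only [PySem.Chars.isupper, Bool.and_eq_true, decide_eq_true_eq] at h
  simp only [PySem.Chars.islower, Bool.and_eq_false_iff, decide_eq_false_iff_not]
  left; intro h2; exact absurd (le_trans h2 h.2) (by decide)
theorem pyStrIsupper_single (c : Char) : pyStrIsupper [c] = PySem.Chars.isupper c := by
  simp only [pyStrIsupper, List.any_cons, List.any_nil, List.all_cons, List.all_nil, Bool.or_false, Bool.and_true, PySem.Chars.isalpha]
  cases h1 : PySem.Chars.isupper c <;> cases h2 : PySem.Chars.islower c <;> simp_all [upper_not_lower]
theorem pyStrIsupper_pair (c : Char) : pyStrIsupper ([c] ++ ['1']) = PySem.Chars.isupper c := by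
  simp only [pyStrIsupper, List.cons_append, List.nil_append, List.any_cons, List.any_nil, List.all_cons, List.all_nil, Bool.or_false, Bool.and_true, PySem.Chars.isalpha]
  have : PySem.Chars.isupper '1' = false := by decide
  have : PySem.Chars.islower '1' = false := by decide
  cases h1 : PySem.Chars.isupper c <;> cases h2 : PySem.Chars.islower c <;> simp_all [upper_not_lower]
theorem strIsdigit_single (c : Char) : PySem.Chars.strIsdigit [c] = PySem.Chars.isdigit c := by
  simp [PySem.Chars.strIsdigit]
theorem strIsdigit_pair (c : Char) : PySem.Chars.strIsdigit ([c] ++ ['1']) = PySem.Chars.isdigit c := by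
  simp [PySem.Chars.strIsdigit]; intro; decide
theorem strIsalpha_single (c : Char) : PySem.Chars.strIsalpha [c] = PySem.Chars.isalpha c := by
  simp [PySem.Chars.strIsalpha]

theorem pySetD_neg (xs : List (List Char)) (k : Nat) (v : List Char) (h1 : 0 < k) (h2 : k ≤ xs.length) :
    PySem.List.pySetD xs (-(k : Int)) v = xs.set (xs.length - k) v := by
  simp only [PySem.List.pySetD, PySem.List.pySet?, PySem.List.pyIdx?]
  rw [if_neg (by omega), if_pos (by omega)]
  simp only [Option.map_some, Option.getD_some]
  congr 1
  omega

theorem SState_one (l1 : List (List Char)) : SState l1 1 = l1 := by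
  apply List.ext_getElem (by simp [SState])
  intro i h1 h2
  simp only [SState, List.getElem_mapIdx]
  rw [if_neg (by omega)]

theorem length_SState (l1 : List (List Char)) (k : Nat) : (SState l1 k).length = l1.length := by
  simp [SState]

theorem stepA_SState (l1 : List (List Char)) (m : Nat) (h : m + 1 < l1.length) :
    stepA (SState l1 (m+1)) ((m : Int) + 1) = SState l1 (m+2) := by
  have hcast : ((m : Int) + 1) = (((m+1 : Nat)) : Int) := by push_cast; ring
  have hm1 : (((m+1 : Nat) : Int) - 1) = ((m : Nat) : Int) := by push_cast; ring
  simp only [stepA, hcast, hm1, PySem.List.pyGetD_natCast, PySem.List.pySetD_natCast]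
  have g1 : (SState l1 (m+1)).getD (m+1) [] = l1[m+1] := by
    rw [List.getD_eq_getElem _ _ (by rw [length_SState]; omega)]
    simp only [SState, List.getElem_mapIdx]
    rw [if_neg (by omega)]
  have g0 : (SState l1 (m+1)).getD m [] = l1[m] := by
    rw [List.getD_eq_getElem _ _ (by rw [length_SState]; omega)]
    simp only [SState, List.getElem_mapIdx]
    rw [if_neg (by omega)]
  rw [g1, g0]
  have hCB : (pyStrIsupper l1[m+1] && !PySem.Chars.strIsdigit l1[m]) = CB l1 m := by
    simp only [CB]
    rw [List.getD_eq_getElem _ _ (by omega), List.getD_eq_getElem _ _ (by omega)]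
  rw [hCB]
  cases hC : CB l1 m with
  | true =>
    simp only [if_pos]
    apply List.ext_getElem (by simp [SState])
    intro j hj1 hj2
    rw [List.getElem_set]
    simp only [SState, List.getElem_mapIdx]
    by_cases hjm : m = j
    · subst hjm
      rw [if_pos rfl, if_pos ⟨by omega, hC⟩]
    · rw [if_neg hjm]
      by_cases hcnd : j + 2 ≤ m + 1 ∧ CB l1 j = true
      · rw [if_pos hcnd, if_pos ⟨by omega, hcnd.2⟩]
      · rw [if_neg hcnd, if_neg (by
          intro ⟨ha, hb⟩
          exact hcnd ⟨by omega, hb⟩)]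
  | false =>
    simp only [Bool.false_eq_true, if_false]
    apply List.ext_getElem (by simp [SState])
    intro j hj1 hj2
    simp only [SState, List.getElem_mapIdx]
    by_cases hjm : j = m
    · subst hjm
      rw [if_neg (by omega), if_neg (by intro ⟨ha, hb⟩; rw [hC] at hb; exact absurd hb (by simp))]
    · by_cases hcnd : j + 2 ≤ m + 1 ∧ CB l1 j = true
      · rw [if_pos hcnd, if_pos ⟨by omega, hcnd.2⟩]
      · rw [if_neg hcnd, if_neg (by intro ⟨ha, hb⟩; exact hcnd ⟨by omega, hb⟩)]

theorem loopA (l1 : List (List Char)) :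
    ∀ (m : Nat), m < l1.length →
      ((List.range m).map (fun k => ((k : Nat) : Int) + 1)).foldl stepA l1 = SState l1 (m+1) := by
  intro m
  induction m with
  | zero => intro _; simpa using (SState_one l1).symm
  | succ m ih =>
    intro h
    rw [List.range_succ, List.map_append, List.foldl_append, ih (by omega)]
    simpa using stepA_SState l1 m (by omega)

theorem pyRange_bridge (n : Nat) :
    PySem.List.pyRange 1 (n : Int) 1 = (List.range (n-1)).map (fun k => ((k : Nat) : Int) + 1) := by
  rw [PySem.List.pyRange_one]
  have : ((n : Int) - 1).toNat = n - 1 := by omega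
  rw [this]
  exact List.map_congr_left (fun k _ => by ring)

-- the state after A's whole loop, chunk-free positional characterization
theorem SState_pieces (cs : List Char) (l1 : List (List Char)) (tm : Nat → Bool)
    (hlen : l1.length = cs.length)
    (hl1 : ∀ (j : Nat), j < cs.length →
      l1.getD j [] = [cs.getD j ' '] ++ (if tm j then ['1'] else []))
    (hdisj : ∀ (j : Nat), j < cs.length → tm j = true → lmarkB cs j = false) :
    SState l1 cs.length = cs.mapIdx (fun j c => c :: (if (tm j || lmarkB cs j) then ['1'] else [])) := by
  apply List.ext_getElem (by simp [SState, hlen])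
  intro j hj1 hj2
  have hjn : j < cs.length := by simpa using hj2
  have hgj : cs.getD j ' ' = cs[j] := List.getD_eq_getElem _ _ hjn
  simp only [SState, List.getElem_mapIdx]
  have hdig : PySem.Chars.strIsdigit (l1.getD j []) = PySem.Chars.isdigit cs[j] := by
    rw [hl1 j hjn, hgj]
    by_cases htm : tm j = true
    · rw [if_pos htm, strIsdigit_pair]
    · rw [if_neg htm]; exact strIsdigit_single _
  have hcond : (j + 2 ≤ cs.length ∧ CB l1 j = true) ↔ lmarkB cs j = true := by
    by_cases hj1n : j + 1 < cs.length
    · have hup : pyStrIsupper (l1.getD (j+1) []) = PySem.Chars.isupper (cs.getD (j+1) ' ') := by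
        rw [hl1 (j+1) hj1n]
        by_cases htm : tm (j+1) = true
        · rw [if_pos htm, pyStrIsupper_pair]
        · rw [if_neg htm]; exact pyStrIsupper_single _
      simp only [CB, hup, hdig, lmarkB, List.getD_eq_getElem _ _ hjn,
        Bool.and_eq_true, decide_eq_true_eq]
      constructor
      · rintro ⟨-, h1, h2⟩; exact ⟨⟨hj1n, h1⟩, h2⟩
      · rintro ⟨⟨-, h1⟩, h2⟩; exact ⟨by omega, h1, h2⟩
    · constructor
      · rintro ⟨hle, -⟩; omega
      · intro hl
        simp only [lmarkB, Bool.and_eq_true, decide_eq_true_eq] at hl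
        omega
  rw [← List.getD_eq_getElem l1 [] (show j < l1.length by omega), hl1 j hjn, hgj]
  by_cases htm : tm j = true
  · have hlm := hdisj j hjn htm
    rw [if_pos htm, if_neg (by rw [hcond, hlm]; simp), if_pos (by rw [htm]; simp)]
    simp
  · rw [if_neg htm]
    by_cases hlm : lmarkB cs j = true
    · rw [if_pos (hcond.mpr hlm), if_pos (by rw [hlm]; simp)]
      simp
    · rw [if_neg (fun hc => hlm (hcond.mp hc)),
        if_neg (by simp only [Bool.or_eq_true]; rintro (h | h); exact htm h; exact hlm h)]
      simp

theorem tmGen_disj (cs : List Char) (ion : Bool)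
    (hup : ion = true → PySem.Chars.isupper (cs.getD (cs.length - 1) ' ') = false) :
    ∀ (j : Nat), j < cs.length → tmGen cs ion j = true → lmarkB cs j = false := by
  intro j hj htm
  unfold tmGen at htm
  unfold lmarkB
  cases hio : ion with
  | true =>
    rw [hio] at htm
    simp only [Bool.not_true, Bool.false_and, Bool.or_false, Bool.true_and,
      Bool.and_eq_true, decide_eq_true_eq] at htm
    have : cs.getD (j + 1) ' ' = cs.getD (cs.length - 1) ' ' := by
      congr 1; omega
    rw [this, hup hio]
    simp
  | false =>
    rw [hio] at htm
    simp only [Bool.false_and, Bool.not_false, Bool.true_and, Bool.false_or,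
      Bool.and_eq_true, decide_eq_true_eq] at htm
    have : ¬ (j + 1 < cs.length) := by omega
    simp [this]

theorem final_common (cs : List Char) (ionP : Bool) (l1 : List (List Char))
    (hlen : l1.length = cs.length)
    (hl1 : ∀ (j : Nat), j < cs.length →
      l1.getD j [] = [cs.getD j ' '] ++ (if tmGen cs ionP j then ['1'] else []))
    (hup : ionP = true → PySem.Chars.isupper (cs.getD (cs.length - 1) ' ') = false)
    (hn1 : 0 < cs.length) :
    ((PySem.List.pyRange 1 (cs.length : Int) 1).foldl stepA l1).flatten = NForm cs ionP := by
  rw [pyRange_bridge, loopA l1 (cs.length - 1) (by omega),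
    show cs.length - 1 + 1 = cs.length from by omega,
    SState_pieces cs l1 (tmGen cs ionP) hlen hl1 (tmGen_disj cs ionP hup)]
  rfl

-- ===== positional normal form = recursive normal form =====
theorem tmGen_cons (c : Char) (t : List Char) (ion : Bool) (j : Nat) :
    tmGen (c :: t) ion (j+1) = tmGen t ion j := by
  unfold tmGen
  rw [List.getD_cons_succ,
    show (decide (j + 1 + 2 = (c :: t).length)) = decide (j + 2 = t.length) from
      decide_eq_decide.mpr (by simp only [List.length_cons]; omega),
    show (decide (j + 1 + 1 = (c :: t).length)) = decide (j + 1 = t.length) from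
      decide_eq_decide.mpr (by simp only [List.length_cons]; omega)]

theorem lmarkB_cons (c : Char) (t : List Char) (j : Nat) :
    lmarkB (c :: t) (j+1) = lmarkB t j := by
  unfold lmarkB
  rw [List.getD_cons_succ, List.getD_cons_succ,
    show (decide (j + 1 + 1 < (c :: t).length)) = decide (j + 1 < t.length) from
      decide_eq_decide.mpr (by simp)]

theorem NForm_eq_insOnes (ion : Bool) : ∀ (cs : List Char), NForm cs ion = insOnes ion cs := by
  intro cs
  induction cs with
  | nil => rfl
  | cons c t ih =>
    unfold NForm
    rw [List.mapIdx_cons, List.flatten_cons]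
    have hshift : (t.mapIdx fun j x => x :: (if (tmGen (c :: t) ion (j+1) || lmarkB (c :: t) (j+1)) then ['1'] else []))
        = t.mapIdx (fun j x => x :: (if (tmGen t ion j || lmarkB t j) then ['1'] else [])) := by
      apply List.ext_getElem (by simp)
      intro k h1 h2
      simp only [List.getElem_mapIdx]
      rw [tmGen_cons, lmarkB_cons]
    rw [hshift]
    show _ ++ NForm t ion = _
    rw [ih]
    rfl

-- ===== B-side: chunk recursion =====
def chunksRec : List Char → List Char → List (List Char)
  | [], cur => [cur]
  | c :: t, cur => if PySem.Chars.isupper c then cur :: chunksRec t [c] else chunksRec t (cur ++ [c])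

def procChunks : List (List Char) → List Char
  | [] => []
  | [ch] => gLast ch
  | ch :: ch' :: more => fChunk ch ++ procChunks (ch' :: more)

theorem fold_chunks : ∀ (rest : List Char) (acc : List (List Char)) (cur : List Char),
    (rest.foldl chunkStep (acc, cur)).1 ++ [(rest.foldl chunkStep (acc, cur)).2]
      = acc ++ chunksRec rest cur := by
  intro rest
  induction rest with
  | nil => intro acc cur; simp [chunksRec]
  | cons c t ih =>
    intro acc cur
    have hstep : chunkStep (acc, cur) c
        = if PySem.Chars.isupper c then (acc ++ [cur], [c]) else (acc, cur ++ [c]) := rfl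
    rw [List.foldl_cons, hstep]
    unfold chunksRec
    by_cases h : PySem.Chars.isupper c = true
    · rw [if_pos h, if_pos h, ih]
      simp
    · rw [if_neg h, if_neg h, ih]

theorem chunksRec_ne_nil : ∀ (rest cur : List Char), chunksRec rest cur ≠ [] := by
  intro rest
  induction rest with
  | nil => intro cur; simp [chunksRec]
  | cons c t ih =>
    intro cur
    unfold chunksRec
    split_ifs
    · simp
    · exact ih _

theorem proc_cons (ch : List Char) (L : List (List Char)) (h : L ≠ []) :
    procChunks (ch :: L) = fChunk ch ++ procChunks L := by
  cases L with
  | nil => exact absurd rfl h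
  | cons a t => rfl

theorem proc_spec : ∀ (L : List (List Char)), L ≠ [] →
    ((L.dropLast.map fChunk).flatten) ++ gLast (L.getLast?.getD []) = procChunks L := by
  intro L
  induction L with
  | nil => intro h; exact absurd rfl h
  | cons ch t ih =>
    intro _
    cases t with
    | nil => simp [procChunks]
    | cons ch' more =>
      rw [proc_cons ch (ch' :: more) (by simp)]
      rw [← ih (by simp)]
      simp [List.dropLast_cons₂]

theorem fChunk_cons (a : Char) (rest : List Char) (h : rest ≠ []) :
    fChunk (a :: rest) = a :: fChunk rest := by
  unfold fChunk
  rw [PySem.List.pyGetD_neg_one _ ' ' (by simp), PySem.List.pyGetD_neg_one _ ' ' h,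
    List.getLast_cons h]
  split_ifs <;> simp

theorem gLast_cons (a b : Char) (t : List Char) (ht : t ≠ []) :
    gLast (a :: b :: t) = a :: gLast (b :: t) := by
  unfold gLast
  have hne : (b :: t).dropLast ≠ [] := by
    cases t with
    | nil => exact absurd rfl ht
    | cons x xs => simp [List.dropLast_cons₂]
  have h1 : PySem.List.pyGetD (a :: b :: t) (-1) ' ' = PySem.List.pyGetD (b :: t) (-1) ' ' := by
    rw [PySem.List.pyGetD_neg_one _ ' ' (by simp), PySem.List.pyGetD_neg_one _ ' ' (by simp),
      List.getLast_cons (by simp)]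
  have h2 : (a :: b :: t).dropLast = a :: (b :: t).dropLast := by
    simp [List.dropLast_cons₂]
  have h3 : PySem.List.pyGetD (a :: (b :: t).dropLast) (-1) ' '
      = PySem.List.pyGetD ((b :: t).dropLast) (-1) ' ' := by
    rw [PySem.List.pyGetD_neg_one (a :: (b :: t).dropLast) ' ' (by simp),
      List.getLast_cons hne, PySem.List.pyGetD_neg_one _ ' ' hne]
  rw [h1, h2, h3]
  split_ifs <;> simp

-- splitting insOnes at an uppercase boundary
theorem insOnes_append_upper (ion : Bool) (c : Char) (r : List Char) (hc : PySem.Chars.isupper c = true) :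
    ∀ (cur : List Char), cur ≠ [] → (∀ x ∈ cur.tail, PySem.Chars.isupper x = false) →
      insOnes ion (cur ++ c :: r) = fChunk cur ++ insOnes ion (c :: r) := by
  intro cur
  induction cur with
  | nil => intro h _; exact absurd rfl h
  | cons a rest ih =>
    intro _ hup
    cases rest with
    | nil =>
      have hfa : fChunk [a] = a :: (if !PySem.Chars.isdigit a then ['1'] else []) := by
        unfold fChunk
        rw [PySem.List.pyGetD_neg_one _ ' ' (by simp)]
        simp only [List.getLast_singleton]
        split_ifs <;> simp
      have hC : (tmGen (a :: c :: r) ion 0 || lmarkB (a :: c :: r) 0) = !PySem.Chars.isdigit a := by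
        unfold tmGen lmarkB
        simp only [List.getD_cons_zero, List.getD_cons_succ, List.length_cons]
        have e2 : decide ((0:Nat) + 1 = r.length + 1 + 1) = false := by
          rw [decide_eq_false_iff_not]; omega
        have e3 : decide ((0:Nat) + 1 < r.length + 1 + 1) = true := by
          rw [decide_eq_true_eq]; omega
        cases hd : PySem.Chars.isdigit a <;> simp [hc]
      show insOnes ion ([a] ++ c :: r) = _
      rw [List.singleton_append,
        show insOnes ion (a :: c :: r)
          = (a :: (if (tmGen (a :: c :: r) ion 0 || lmarkB (a :: c :: r) 0) then ['1'] else []))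
            ++ insOnes ion (c :: r) from rfl,
        hC, hfa]
    | cons b rest' =>
      have hub : PySem.Chars.isupper b = false := hup b (by simp)
      have hC : (tmGen (a :: ((b :: rest') ++ c :: r)) ion 0
          || lmarkB (a :: ((b :: rest') ++ c :: r)) 0) = false := by
        unfold tmGen lmarkB
        have e1 : decide ((0:Nat) + 2 = (a :: ((b :: rest') ++ c :: r)).length) = false := by
          rw [decide_eq_false_iff_not]; simp only [List.length_cons, List.length_append]; omega
        have e2 : decide ((0:Nat) + 1 = (a :: ((b :: rest') ++ c :: r)).length) = false := by
          rw [decide_eq_false_iff_not]; simp only [List.length_cons, List.length_append]; omega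
        have e4 : (a :: ((b :: rest') ++ c :: r)).getD 1 ' ' = b := rfl
        rw [e1, e2, e4, hub]
        simp
      have hrec := ih (by simp) (fun x hx => hup x (by simp; right; exact (by simpa using hx)))
      calc insOnes ion ((a :: b :: rest') ++ c :: r)
          = (a :: (if (tmGen (a :: ((b :: rest') ++ c :: r)) ion 0
              || lmarkB (a :: ((b :: rest') ++ c :: r)) 0) then ['1'] else []))
            ++ insOnes ion ((b :: rest') ++ c :: r) := rfl
        _ = [a] ++ insOnes ion ((b :: rest') ++ c :: r) := by rw [hC]; simp
        _ = [a] ++ (fChunk (b :: rest') ++ insOnes ion (c :: r)) := by rw [hrec]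
        _ = fChunk (a :: b :: rest') ++ insOnes ion (c :: r) := by
            rw [fChunk_cons a (b :: rest') (by simp)]
            simp

-- the final chunk: insOnes computes B's tail rule
theorem insOnes_last (ion : Bool) :
    ∀ (cur : List Char), cur ≠ [] → (∀ x ∈ cur.tail, PySem.Chars.isupper x = false) →
      ion = sigChar (cur.getLast?.getD ' ') → (ion = true → 2 ≤ cur.length) →
      insOnes ion cur = gLast cur := by
  intro cur
  induction cur with
  | nil => intro h; exact absurd rfl h
  | cons a rest ih =>
    intro _ hup hion h2
    cases rest with
    | nil =>
      have hio : ion = false := by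
        cases hi : ion
        · rfl
        · exact absurd (h2 hi) (by simp)
      subst hio
      simp only [List.getLast?_singleton, Option.getD_some] at hion
      have hsa : ¬ (a = '+' ∨ a = '-') := by
        intro h
        rcases h with h | h <;> (rw [h] at hion; simp [sigChar] at hion)
      show insOnes false [a] = gLast [a]
      unfold gLast
      rw [PySem.List.pyGetD_neg_one _ ' ' (by simp)]
      simp only [List.getLast_singleton]
      rw [if_neg hsa]
      have hC : (tmGen [a] false 0 || lmarkB [a] 0) = PySem.Chars.isalpha a := by
        unfold tmGen lmarkB
        simp
      rw [show insOnes false [a]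
          = (a :: (if (tmGen [a] false 0 || lmarkB [a] 0) then ['1'] else [])) ++ insOnes false [] from rfl, hC]
      by_cases hA : PySem.Chars.isalpha a = true <;> simp [insOnes, hA]
    | cons b rest' =>
      have hub : PySem.Chars.isupper b = false := hup b (by simp)
      cases rest' with
      | nil =>
        -- cur = [a, b]
        simp only [List.getLast?_cons_cons, List.getLast?_singleton, Option.getD_some] at hion
        have hC1 : (tmGen [a, b] ion 0 || lmarkB [a, b] 0) = (!PySem.Chars.isdigit a && (ion || PySem.Chars.isupper b)) := by
          unfold tmGen lmarkB
          simp only [List.getD_cons_zero, List.getD_cons_succ, List.length_cons, List.length_nil]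
          cases ion <;> cases PySem.Chars.isdigit a <;> simp
        have hC2 : (tmGen [b] ion 0 || lmarkB [b] 0) = (!ion && PySem.Chars.isalpha b) := by
          unfold tmGen lmarkB
          cases ion <;> simp
        have hins : insOnes ion [a, b]
            = (a :: (if (tmGen [a, b] ion 0 || lmarkB [a, b] 0) then ['1'] else []))
              ++ ((b :: (if (tmGen [b] ion 0 || lmarkB [b] 0) then ['1'] else [])) ++ []) := rfl
        rw [hins, hC1, hC2]
        unfold gLast
        rw [PySem.List.pyGetD_neg_one _ ' ' (by simp)]
        simp only [show ([a,b] : List Char).getLast (by simp) = b from rfl]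
        cases hsb : sigChar b with
        | true =>
          have hio : ion = true := by rw [hion]; exact hsb
          subst hio
          have hbpm : b = '+' ∨ b = '-' := by
            unfold sigChar at hsb
            rcases Bool.or_eq_true_iff.mp hsb with h | h
            · exact Or.inl (by simpa using h)
            · exact Or.inr (by simpa using h)
          rw [if_pos hbpm]
          simp only [List.dropLast_cons₂, List.dropLast_singleton]
          rw [PySem.List.pyGetD_neg_one _ ' ' (by simp)]
          simp only [List.getLast_singleton]
          by_cases hd : PySem.Chars.isdigit a = true <;> simp [hd, hub]
        | false =>
          have hio : ion = false := by rw [hion]; exact hsb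
          subst hio
          have hbpm : ¬ (b = '+' ∨ b = '-') := by
            intro h
            rcases h with h | h <;> (rw [h] at hsb; simp [sigChar] at hsb)
          rw [if_neg hbpm]
          by_cases hA : PySem.Chars.isalpha b = true <;> simp [hA, hub]
      | cons d rest'' =>
        -- cur = a :: b :: d :: rest''
        have hstep : insOnes ion (a :: b :: d :: rest'') = a :: insOnes ion (b :: d :: rest'') := by
          have hC : (tmGen (a :: b :: d :: rest'') ion 0 || lmarkB (a :: b :: d :: rest'') 0) = false := by
            unfold tmGen lmarkB
            have e1 : decide ((0:Nat) + 2 = (a :: b :: d :: rest'').length) = false := by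
              rw [decide_eq_false_iff_not]; simp only [List.length_cons]; omega
            have e2 : decide ((0:Nat) + 1 = (a :: b :: d :: rest'').length) = false := by
              rw [decide_eq_false_iff_not]; simp only [List.length_cons]; omega
            have e4 : (a :: b :: d :: rest'').getD 1 ' ' = b := rfl
            rw [e1, e2, e4, hub]
            simp
          rw [show insOnes ion (a :: b :: d :: rest'')
              = (a :: (if (tmGen (a :: b :: d :: rest'') ion 0 || lmarkB (a :: b :: d :: rest'') 0) then ['1'] else []))
                ++ insOnes ion (b :: d :: rest'') from rfl, hC]
          simp
        rw [hstep, ih (by simp) (fun x hx => hup x (by simp; right; exact (by simpa using hx)))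
          (by rw [hion]; simp)
          (fun _ => by simp),
          gLast_cons a b (d :: rest'') (by simp)]

theorem chunks_ins (ion : Bool) :
    ∀ (rest cur : List Char), cur ≠ [] →
      (∀ x ∈ cur.tail, PySem.Chars.isupper x = false) →
      ion = sigChar ((cur ++ rest).getLast?.getD ' ') →
      (ion = true → 2 ≤ (cur ++ rest).length) →
      procChunks (chunksRec rest cur) = insOnes ion (cur ++ rest) := by
  intro rest
  induction rest with
  | nil =>
    intro cur hc hup hion h2
    rw [List.append_nil] at hion h2 ⊢
    rw [show chunksRec [] cur = [cur] from rfl, show procChunks [cur] = gLast cur from rfl]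
    exact (insOnes_last ion cur hc hup hion h2).symm
  | cons c t ih =>
    intro cur hc hup hion h2
    unfold chunksRec
    by_cases hu : PySem.Chars.isupper c = true
    · rw [if_pos hu, proc_cons _ _ (chunksRec_ne_nil t [c])]
      have hlast : ((cur ++ c :: t).getLast?.getD ' ') = (([c] ++ t).getLast?.getD ' ') := by
        rw [List.getLast?_append]
        cases h : (c :: t).getLast? with
        | none => simp at h
        | some x => simp [h]
      have ht2 : ion = true → 2 ≤ ([c] ++ t).length := by
        intro hi
        cases t with
        | nil =>
          exfalso
          rw [hion, hlast] at hi
          have hsc : sigChar c = true := by simpa using hi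
          have hc' : c = '+' ∨ c = '-' := by
            unfold sigChar at hsc
            rcases Bool.or_eq_true_iff.mp hsc with h | h
            · exact Or.inl (by simpa using h)
            · exact Or.inr (by simpa using h)
          rcases hc' with h | h <;> (rw [h] at hu; exact absurd hu (by decide))
        | cons x xs => simp
      rw [ih [c] (by simp) (by simp) (by rw [hion, hlast]) ht2,
        insOnes_append_upper ion c t hu cur hc hup, List.singleton_append]
    · rw [if_neg hu]
      have heq : (cur ++ [c]) ++ t = cur ++ c :: t := by simp
      have hup' : ∀ x ∈ (cur ++ [c]).tail, PySem.Chars.isupper x = false := by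
        cases cur with
        | nil => exact absurd rfl hc
        | cons a cur' =>
          intro x hx
          simp only [List.cons_append, List.tail_cons] at hx
          rcases List.mem_append.mp hx with h | h
          · exact hup x (by simpa using h)
          · simp only [List.mem_singleton] at h
            subst h
            simpa using hu
      rw [ih (cur ++ [c]) (by simp) hup' (by rw [hion]; congr 2; rw [heq]) (by rw [heq]; exact h2), heq]

-- ===== A-side endgame =====
theorem A_norm (formula : String)
    (hne : formula.toList ≠ [])
    (hion2 : (formula.toList.getLast? = some '+' ∨ formula.toList.getLast? = some '-') → 2 ≤ formula.toList.length) :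
    Addones formula = String.ofList (NForm formula.toList (ionOf formula.toList)) := by
  unfold Addones
  dsimp only
  set cs := formula.toList with hcs
  have hn1 : 0 < cs.length := List.length_pos_of_ne_nil hne
  have hL : cs.length - 1 < cs.length := by omega
  have hG1 : PySem.List.pyGetD (cs.map fun c => [c]) (-1) ([] : List Char) = [cs[cs.length-1]'hL] := by
    rw [PySem.List.pyGetD_neg_ofNat _ 1 _ (by norm_num) (by simpa using hn1)]
    simp
  have hG1' : PySem.List.pyGetD cs (-1) ' ' = cs[cs.length-1]'hL := by
    rw [PySem.List.pyGetD_neg_ofNat _ 1 _ (by norm_num) (by omega)]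
  rw [hG1]
  set L := cs[cs.length-1]'hL with hLdef
  obtain ⟨ionP, hionP⟩ : ∃ b, ionOf cs = b := ⟨_, rfl⟩
  rw [hionP]
  have hionOf : ionP = (L == '+' || L == '-') := by
    rw [← hionP]
    unfold ionOf sigChar
    rw [hG1']
  by_cases hio : (L = '+' ∨ L = '-')
  · have hionPt : ionP = true := by
      rw [hionOf]; rcases hio with h | h <;> simp [h]
    have hgl : cs.getLast? = some L := by
      rw [List.getLast?_eq_getElem?, List.getElem?_eq_getElem hL]
    have h2 : 2 ≤ cs.length := by
      apply hion2
      rw [hcs] at hgl ⊢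
      rw [hgl]
      rcases hio with h | h
      · exact Or.inl (by rw [h])
      · exact Or.inr (by rw [h])
    have hupL : PySem.Chars.isupper (cs.getD (cs.length - 1) ' ') = false := by
      rw [List.getD_eq_getElem _ _ hL, ← hLdef]
      rcases hio with h | h <;> rw [h] <;> decide
    have hup : ionP = true → PySem.Chars.isupper (cs.getD (cs.length - 1) ' ') = false :=
      fun _ => hupL
    rw [if_pos (hio.imp (fun h => by rw [h]) (fun h => by rw [h]))]
    have hn2 : cs.length - 2 < cs.length := by omega
    have hG2 : PySem.List.pyGetD (cs.map fun c => [c]) (-2) ([] : List Char) = [cs[cs.length-2]'hn2] := by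
      rw [PySem.List.pyGetD_neg_ofNat _ 2 _ (by norm_num) (by simpa using h2)]
      simp
    rw [hG2, strIsdigit_single]
    by_cases hd : PySem.Chars.isdigit (cs[cs.length-2]'hn2) = true
    · rw [if_neg (by simp [hd])]
      apply congrArg String.ofList
      apply final_common cs ionP _ (by simp) ?_ hup hn1
      intro j hj
      rw [List.getD_eq_getElem _ _ (by simpa using hj), List.getElem_map]
      have htm : tmGen cs ionP j = false := by
        unfold tmGen
        rw [hionPt]
        by_cases hj2 : j + 2 = cs.length
        · have he : cs[j]'hj = cs[cs.length-2]'hn2 := by congr 1; omega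
          simp [hj2, List.getElem?_eq_getElem hj, he, hd]
        · simp [hj2]
      rw [htm, List.getD_eq_getElem _ _ hj]
      simp
    · rw [if_pos (by simp [hd]), show (-2 : Int) = -((2:Nat) : Int) from by norm_num,
        pySetD_neg _ 2 _ (by norm_num) (by simpa using h2)]
      apply congrArg String.ofList
      apply final_common cs ionP _ (by simp) ?_ hup hn1
      intro j hj
      have hlenm : (cs.map fun c => [c]).length = cs.length := by simp
      rw [List.getD_eq_getElem _ _ (by simp [List.length_set]; omega)]
      rw [List.getElem_set, List.getElem_map]
      have htm : tmGen cs ionP j = (decide (j + 2 = cs.length) && !PySem.Chars.isdigit (cs.getD j ' ')) := by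
        unfold tmGen
        rw [hionPt]
        simp
      rw [htm, List.getD_eq_getElem _ _ hj]
      simp only [hlenm]
      have hd' : PySem.Chars.isdigit (cs[cs.length-2]'hn2) = false := by simpa using hd
      by_cases hj2 : j = cs.length - 2
      · rw [if_pos (by omega)]
        have he : cs[j] = cs[cs.length-2]'hn2 := by congr 1
        rw [if_pos (by rw [he]; simp [show j + 2 = cs.length from by omega, hd'])]
        subst hj2
        simp
      · rw [if_neg (by omega), if_neg (by rw [decide_eq_false_iff_not.mpr (by omega : ¬(j + 2 = cs.length))]; simp)]
        simp
  · have hionPf : ionP = false := by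
      rw [hionOf]
      rcases (not_or.mp hio) with ⟨h1, h2⟩
      simp [h1, h2]
    have hup : ionP = true → PySem.Chars.isupper (cs.getD (cs.length - 1) ' ') = false := by
      intro h; rw [hionPf] at h; exact absurd h (by simp)
    rw [if_neg (by simpa using hio), strIsalpha_single]
    have hgd1 : cs.getD (cs.length - 1) ' ' = L := List.getD_eq_getElem _ _ hL
    have htm : ∀ j, tmGen cs ionP j = (decide (j + 1 = cs.length) && PySem.Chars.isalpha (cs.getD j ' ')) := by
      intro j
      unfold tmGen
      rw [hionPf]
      simp
    by_cases ha : PySem.Chars.isalpha L = true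
    · rw [if_pos ha, show (-1 : Int) = -((1:Nat) : Int) from by norm_num,
        pySetD_neg _ 1 _ (by norm_num) (by simpa using hn1)]
      apply congrArg String.ofList
      apply final_common cs ionP _ (by simp) ?_ hup hn1
      intro j hj
      have hlenm : (cs.map fun c => [c]).length = cs.length := by simp
      rw [List.getD_eq_getElem _ _ (by simp [List.length_set]; omega)]
      rw [List.getElem_set, List.getElem_map, htm j, List.getD_eq_getElem _ _ hj]
      simp only [hlenm]
      by_cases hj1 : j = cs.length - 1
      · rw [if_pos (by omega)]
        have he : cs[j] = L := by rw [hLdef]; congr 1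
        rw [if_pos (by rw [he]; simp [show j + 1 = cs.length from by omega, ha])]
        subst hj1
        simp [hLdef]
      · rw [if_neg (by omega), if_neg (by rw [decide_eq_false_iff_not.mpr (by omega)]; simp)]
        simp
    · rw [if_neg ha]
      apply congrArg String.ofList
      apply final_common cs ionP _ (by simp) ?_ hup hn1
      intro j hj
      rw [List.getD_eq_getElem _ _ (by simpa using hj), List.getElem_map, htm j,
        List.getD_eq_getElem _ _ hj]
      by_cases hj1 : j = cs.length - 1
      · have he : cs[j] = L := by rw [hLdef]; congr 1
        rw [he]
        simp [ha]
      · rw [decide_eq_false_iff_not.mpr (by omega)]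
        simp

-- ===== B-side endgame =====
theorem B_norm (formula : String)
    (hne : formula.toList ≠ [])
    (hion2 : (formula.toList.getLast? = some '+' ∨ formula.toList.getLast? = some '-') → 2 ≤ formula.toList.length) :
    Addones_alt formula = String.ofList (insOnes (ionOf formula.toList) formula.toList) := by
  unfold Addones_alt
  dsimp only
  cases hcs : formula.toList with
  | nil => exact absurd hcs hne
  | cons c0 t0 =>
    rw [hcs] at hion2
    have hg0 : PySem.List.pyGetD (c0 :: t0) 0 ' ' = c0 := by
      rw [PySem.List.pyGetD_zero_cons]
    have hdrop : (c0 :: t0).drop 1 = t0 := rfl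
    rw [hg0, hdrop]
    have hchunks : (t0.foldl chunkStep ([], [c0])).1 ++ [(t0.foldl chunkStep ([], [c0])).2]
        = chunksRec t0 [c0] := by
      rw [fold_chunks t0 [] [c0], List.nil_append]
    rw [hchunks, proc_spec _ (chunksRec_ne_nil t0 [c0])]
    have hion : ionOf (c0 :: t0) = sigChar ((([c0]) ++ t0).getLast?.getD ' ') := by
      unfold ionOf
      congr 1
      rw [PySem.List.pyGetD_neg_one _ ' ' (by simp), List.getLast?_eq_some_getLast (by simp)]
      simp
    have h2' : ionOf (c0 :: t0) = true → 2 ≤ (([c0]) ++ t0).length := by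
      intro hi
      apply hion2
      have hlast : (c0 :: t0).getLast? = some ((c0 :: t0).getLast (by simp)) :=
        List.getLast?_eq_some_getLast (by simp)
      unfold ionOf sigChar at hi
      rw [PySem.List.pyGetD_neg_one _ ' ' (by simp)] at hi
      rcases Bool.or_eq_true_iff.mp hi with h | h
      · exact Or.inl (by rw [hlast]; congr 1; simpa using h)
      · exact Or.inr (by rw [hlast]; congr 1; simpa using h)
    rw [chunks_ins (ionOf (c0 :: t0)) t0 [c0] (by simp) (by simp) hion h2']
    rfl

-- ===== VERDICT (by name: the statement is the Claim_ definition above) =====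
theorem Addones_spec : Claim_equal_Addones := by
  intro formula _ hpre
  unfold Spec_Addones
  rw [A_norm formula hpre.1 hpre.2, B_norm formula hpre.1 hpre.2, NForm_eq_insOnes]
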